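-- pv_equiv track=rewrite | github.com/KEUMIN/algorithm_2024 | binary_search/64062_R.py | solution
-- ===== SOURCE A (Python) =====
-- def solution(stones, k):
--     def can_cross(mid):
--         # mid 값으로 건널 수 있는지 확인하는 함수
--         count = 0
--         for stone in stones:
--             if stone < mid:
--                 count += 1
--                 if count >= k:  # k개의 연속된 돌을 건너뛸 수 없으면 실패
--                     return False
--             else:
--                 count = 0
--         return True
--
--     # 이진 탐색 초기화
--     left, right = 1, max(stones)
--     answer = 0
--
--     while left <= right:
--         mid = (left + right) // 2
--         if can_cross(mid):
--             answer = mid  # 가능한 경우, 정답을 갱신하고 더 큰 값을 탐색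
--             left = mid + 1
--         else:
--             right = mid - 1  # 불가능한 경우, 더 작은 값을 탐색
--
--     return answer
-- ===== SOURCE B (Python) =====
-- def solution(stones, k):
--     # min over size-w windows of the window maximum (w = max(k,1)), clamped to 0;
--     # no binary search: the answer is the smallest window maximum directly.
--     n = len(stones)
--     w = k if k > 1 else 1
--     if w > n:
--         m = max(stones)
--     else:
--         m = min(max(stones[i:i + w]) for i in range(n - w + 1))
--     return m if m > 0 else 0
-- ===== Notes on version B (the rewrite author's own statement) =====
-- stated objective: simpler
-- what changed: Replaces A's binary search over candidate answers (re-scanning all stones per probe) by a direct computation: the answer is the minimum over all windows of max(k,1) consecutive stones of the window maximum, clamped to 0.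
import Mathlib
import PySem

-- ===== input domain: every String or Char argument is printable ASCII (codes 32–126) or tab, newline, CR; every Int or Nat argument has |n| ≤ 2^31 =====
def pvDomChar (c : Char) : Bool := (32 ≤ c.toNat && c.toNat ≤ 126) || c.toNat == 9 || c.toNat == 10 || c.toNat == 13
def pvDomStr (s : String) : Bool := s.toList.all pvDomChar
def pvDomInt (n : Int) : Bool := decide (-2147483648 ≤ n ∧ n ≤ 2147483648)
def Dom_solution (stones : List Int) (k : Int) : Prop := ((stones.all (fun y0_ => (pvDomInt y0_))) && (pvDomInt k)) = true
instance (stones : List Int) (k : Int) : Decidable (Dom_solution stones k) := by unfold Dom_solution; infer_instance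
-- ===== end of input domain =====

-- B replaces A's binary search over the answer by a direct computation: the answer is the
-- smallest maximum over all windows of max(k,1) consecutive stones, clamped to 0 (objective: simpler).

-- ===== PORT A =====
-- inner helper can_cross(mid): count consecutive stones below mid, fail at count >= k
def canCross (k mid : Int) : List Int → Int → Bool
  | [], _ => true
  | s :: rest, count =>
    if s < mid then
      if count + 1 ≥ k then false else canCross k mid rest (count + 1)
    else canCross k mid rest 0

-- the while-loop of the binary search (state: left, right, answer)
def bsLoop (stones : List Int) (k : Int) (left right answer : Int) : Int :=
  if h : left ≤ right then
    let mid := PySem.Int.floordiv (left + right) 2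
    if canCross k mid stones 0 then bsLoop stones k (mid + 1) right mid
    else bsLoop stones k left (mid - 1) answer
  else answer
termination_by (right + 1 - left).toNat
decreasing_by
  · have := PySem.Int.floordiv_two_mid_bounds h; omega
  · have := PySem.Int.floordiv_two_mid_bounds h; omega

def solution (stones : List Int) (k : Int) : Int :=
  bsLoop stones k 1 ((PySem.List.max? stones (fun y => y)).getD 0) 0

-- ===== PORT B =====
def solution_alt (stones : List Int) (k : Int) : Int :=
  let n : Int := stones.length
  let w : Int := if k > 1 then k else 1
  let m : Int :=
    if w > n then (PySem.List.max? stones (fun y => y)).getD 0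
    else
      (PySem.List.min?
        ((PySem.List.pyRange 0 (n - w + 1) 1).map
          (fun i => (PySem.List.max? (PySem.List.slice stones (some i) (some (i + w))) (fun y => y)).getD 0))
        (fun y => y)).getD 0
  if m > 0 then m else 0

-- ===== PRECONDITION & SPEC =====
-- Pre_ excludes only the empty list, on which A's max(stones) raises ValueError (B raises there too).
def Pre_solution (stones : List Int) (k : Int) : Prop := stones ≠ []
instance (stones : List Int) (k : Int) : Decidable (Pre_solution stones k) := by unfold Pre_solution; infer_instance
def pvWitness_solution : List Int × Int := ([2, 4, 5, 3, 2, 1, 4, 2, 5, 1], 3)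

def Spec_solution (stones : List Int) (k : Int) (out : Int) : Prop := out = solution_alt stones k
instance (stones : List Int) (k : Int) (out : Int) : Decidable (Spec_solution stones k out) := by unfold Spec_solution; infer_instance

-- ===== CLAIM (what is proved, stated in full; the proofs are below) =====
def Claim_equal_solution : Prop := ∀ (stones : List Int) (k : Int), Dom_solution stones k → Pre_solution stones k → Spec_solution stones k (solution stones k)

-- ===== LEMMAS AND PROOFS =====
lemma mem_take_of_le {l : List Int} {a b : Nat} (h : a ≤ b) {x : Int} (hx : x ∈ l.take a) : x ∈ l.take b := by
  have : l.take a = (l.take b).take a := by rw [List.take_take, Nat.min_eq_left h]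
  rw [this] at hx
  exact List.mem_of_mem_take hx

lemma take_pos_cons (s : Int) (rest : List Int) {j : Nat} (hj : 1 ≤ j) :
    (s :: rest).take j = s :: rest.take (j - 1) := by
  cases j with
  | zero => omega
  | succ j' => simp [List.take_succ_cons]

-- "some window of wn consecutive stones lies entirely below mid"
def Bad (stones : List Int) (wn : Nat) (mid : Int) : Prop :=
  ∃ i : Nat, i + wn ≤ stones.length ∧ ∀ x ∈ (stones.drop i).take wn, x < mid

lemma canCross_false_iff (k mid : Int) (wn : Nat) (hw : (wn : Int) = max k 1) :
    ∀ (l : List Int) (c : Int), 0 ≤ c →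
      (canCross k mid l c = false ↔
        (∃ j : Nat, 1 ≤ j ∧ j ≤ l.length ∧ k ≤ c + j ∧ ∀ x ∈ l.take j, x < mid) ∨
        Bad l wn mid) := by
  have hwn1 : 1 ≤ wn := by omega
  intro l
  induction l with
  | nil =>
    intro c _
    constructor
    · intro h
      simp [canCross] at h
    · rintro (⟨j, hj1, hjl, _, _⟩ | ⟨i, hi, _⟩)
      · simp at hjl; omega
      · simp at hi; omega
  | cons s rest ih =>
    intro c hc
    by_cases hs : s < mid
    · by_cases hk : c + 1 ≥ k
      · -- returns false immediately
        constructor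
        · intro _
          left
          exact ⟨1, le_refl 1, by simp, by omega, by simpa using hs⟩
        · intro _
          simp [canCross, hs, hk]
      · -- k ≥ 2 here, wn = k.toNat
        have hk2 : 2 ≤ k := by omega
        have hwk : (wn : Int) = k := by omega
        have hstep : canCross k mid (s :: rest) c = canCross k mid rest (c + 1) := by
          simp [canCross, hs, hk]
        rw [hstep, ih (c + 1) (by omega)]
        constructor
        · rintro (⟨j, hj1, hjl, hjk, hall⟩ | ⟨i, hi, hall⟩)
          · left
            refine ⟨j + 1, by omega, by simp only [List.length_cons]; omega, by omega, ?_⟩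
            intro x hx
            rw [List.take_succ_cons] at hx
            rcases List.mem_cons.mp hx with h | h
            · exact h ▸ hs
            · exact hall x h
          · right
            exact ⟨i + 1, by simp only [List.length_cons]; omega, by simpa using hall⟩
        · rintro (⟨j, hj1, hjl, hjk, hall⟩ | ⟨i, hi, hall⟩)
          · -- j ≥ 2 since j = 1 contradicts c + 1 < k
            have hj2 : 2 ≤ j := by
              by_contra h
              have : j = 1 := by omega
              subst this
              push_cast at hjk
              omega
            left
            refine ⟨j - 1, by omega, by simp only [List.length_cons] at hjl; omega, by omega, ?_⟩
            intro x hx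
            apply hall
            rw [take_pos_cons s rest hj1]
            exact List.mem_cons_of_mem _ hx
          · cases i with
            | zero =>
              -- window starts at head: shift to prefix of rest
              left
              simp only [Nat.zero_add, List.length_cons] at hi
              refine ⟨wn - 1, by omega, by omega, by omega, ?_⟩
              intro x hx
              apply hall
              simp only [List.drop_zero]
              rw [take_pos_cons s rest hwn1]
              exact List.mem_cons_of_mem _ hx
            | succ i' =>
              right
              refine ⟨i', by simp only [List.length_cons] at hi; omega, ?_⟩
              simpa using hall
    · -- s ≥ mid: reset count
      have hstep : canCross k mid (s :: rest) c = canCross k mid rest 0 := by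
        simp [canCross, hs]
      rw [hstep, ih 0 (le_refl 0)]
      constructor
      · rintro (⟨j, hj1, hjl, hjk, hall⟩ | ⟨i, hi, hall⟩)
        · -- run inside rest of length j ≥ k and ≥ 1 → window at i = 1
          right
          have hwj : wn ≤ j := by
            have : (wn : Int) ≤ (j : Int) := by omega
            exact_mod_cast this
          refine ⟨1, by simp only [List.length_cons]; omega, ?_⟩
          intro x hx
          apply hall
          simp only [List.drop_succ_cons, List.drop_zero] at hx
          exact mem_take_of_le hwj hx
        · right
          exact ⟨i + 1, by simp only [List.length_cons]; omega, by simpa using hall⟩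
      · rintro (⟨j, hj1, hjl, hjk, hall⟩ | ⟨i, hi, hall⟩)
        · exfalso
          apply hs
          apply hall s
          rw [take_pos_cons s rest hj1]
          exact List.mem_cons_self
        · cases i with
          | zero =>
            exfalso
            apply hs
            apply hall s
            simp only [List.drop_zero]
            rw [take_pos_cons s rest hwn1]
            exact List.mem_cons_self
          | succ i' =>
            right
            exact ⟨i', by simp only [List.length_cons] at hi; omega, by simpa using hall⟩

lemma canCross_zero_iff (k mid : Int) (wn : Nat) (hw : (wn : Int) = max k 1) (l : List Int) :
    (canCross k mid l 0 = false ↔ Bad l wn mid) := by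
  rw [canCross_false_iff k mid wn hw l 0 (le_refl 0)]
  constructor
  · rintro (⟨j, hj1, hjl, hjk, hall⟩ | h)
    · have hwj : wn ≤ j := by
        have : (wn : Int) ≤ (j : Int) := by omega
        exact_mod_cast this
      refine ⟨0, by omega, ?_⟩
      intro x hx
      simp only [List.drop_zero] at hx
      exact hall x (mem_take_of_le hwj hx)
    · exact h
  · intro h
    exact Or.inr h

lemma bsLoop_eq (stones : List Int) (k M : Int) :
    ∀ (N : Nat) (l r a : Int), (r + 1 - l).toNat = N →
      (∀ mid, l ≤ mid → mid ≤ r → canCross k mid stones 0 = decide (mid ≤ M)) →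
      bsLoop stones k l r a = if l ≤ r ∧ l ≤ M then min M r else a := by
  intro N
  induction N using Nat.strong_induction_on with
  | _ N ih =>
    intro l r a hN hP
    rw [bsLoop]
    by_cases hlr : l ≤ r
    · simp only [dif_pos hlr]
      have hmid := PySem.Int.floordiv_two_mid_bounds hlr
      set mid := PySem.Int.floordiv (l + r) 2 with hmiddef
      by_cases hcc : canCross k mid stones 0 = true
      · rw [if_pos hcc]
        have hMmid : mid ≤ M := by
          have := hP mid hmid.1 hmid.2
          rw [hcc] at this
          exact of_decide_eq_true this.symm
        rw [ih (r + 1 - (mid + 1)).toNat (by omega) (mid + 1) r mid rfl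
            (fun m h1 h2 => hP m (by omega) h2)]
        have hlM : l ≤ M := le_trans hmid.1 hMmid
        split_ifs <;> omega
      · rw [if_neg hcc]
        have hdec : decide (mid ≤ M) = false := by
          rw [← hP mid hmid.1 hmid.2]
          exact eq_false_of_ne_true hcc
        have hMmid : M < mid := by
          have := of_decide_eq_false hdec
          omega
        rw [ih (mid - 1 + 1 - l).toNat (by omega) l (mid - 1) a rfl
            (fun m h1 h2 => hP m h1 (by omega))]
        split_ifs <;> omega
    · simp only [dif_neg hlr]
      rw [if_neg (by omega)]

lemma window_eq (stones : List Int) (w i : Int) (hw : 1 ≤ w) (hi : 0 ≤ i) :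
    PySem.List.slice stones (some i) (some (i + w)) = (stones.drop i.toNat).take w.toNat := by
  rw [PySem.List.slice_toNat stones hi (by omega : (0:Int) ≤ i + w)]
  congr 1
  omega

lemma window_max_spec (stones : List Int) (w i : Int) (hw : 1 ≤ w) (hi : 0 ≤ i)
    (hlen : i + w ≤ (stones.length : Int)) :
    ∃ mx, PySem.List.max? (PySem.List.slice stones (some i) (some (i + w))) (fun y => y) = some mx := by
  cases h : PySem.List.max? (PySem.List.slice stones (some i) (some (i + w))) (fun y => y) with
  | some mx => exact ⟨mx, rfl⟩
  | none =>
    exfalso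
    have hnil := (PySem.List.max?_eq_none_iff _ _).mp h
    rw [window_eq stones w i hw hi] at hnil
    have := congrArg List.length hnil
    simp [List.length_take, List.length_drop] at this
    omega

theorem solution_eq_alt (stones : List Int) (k : Int) (hpre : stones ≠ []) :
    solution stones k = solution_alt stones k := by
  obtain ⟨s, t, rfl⟩ : ∃ s t, stones = s :: t := by
    cases stones with
    | nil => exact absurd rfl hpre
    | cons s t => exact ⟨s, t, rfl⟩
  set stones := s :: t with hstones
  set R := t.foldl max s with hR
  have hmax : PySem.List.max? stones (fun y => y) = some R := PySem.List.max?_id_cons s t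
  have hRub : ∀ x ∈ stones, x ≤ R := by
    intro x hx
    rcases List.mem_cons.mp hx with h | h
    · exact h ▸ (PySem.List.le_foldl_max t s).1
    · exact (PySem.List.le_foldl_max t s).2 x h
  set nI : Int := (stones.length : Int) with hnI
  set w : Int := if k > 1 then k else 1 with hwdef
  have hw1 : 1 ≤ w := by rw [hwdef]; split <;> omega
  have hwmax : w = max k 1 := by rw [hwdef]; split <;> omega
  set wn : Nat := w.toNat with hwn
  have hwcast : (wn : Int) = w := Int.toNat_of_nonneg (by omega)
  have hwhyp : (wn : Int) = max k 1 := by omega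
  have hn1 : 1 ≤ nI := by rw [hnI, hstones]; simp only [List.length_cons]; omega
  by_cases hbig : w > nI
  · -- window longer than the list: can_cross always succeeds, answer = max(stones) clamped
    have hcc : ∀ mid, canCross k mid stones 0 = true := by
      intro mid
      cases hb : canCross k mid stones 0 with
      | true => rfl
      | false =>
        exfalso
        obtain ⟨i, hi, -⟩ := (canCross_zero_iff k mid wn hwhyp stones).mp hb
        omega
    have hA : solution stones k = if 1 ≤ R ∧ 1 ≤ R then min R R else 0 := by
      unfold solution
      rw [hmax]
      exact bsLoop_eq stones k R _ 1 R 0 rfl (fun mid h1 h2 => by rw [hcc mid]; simp [h2])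
    have hB : solution_alt stones k = if R > 0 then R else 0 := by
      unfold solution_alt
      simp only [← hnI, ← hwdef, if_pos hbig, hmax, Option.getD_some]
    rw [hA, hB]
    split_ifs <;> omega
  · -- at least one window fits
    set f : Int → Int := fun i =>
      (PySem.List.max? (PySem.List.slice stones (some i) (some (i + w))) (fun y => y)).getD 0 with hf
    set lst := (PySem.List.pyRange 0 (nI - w + 1) 1).map f with hlst
    have hlstne : lst ≠ [] := by
      rw [hlst, PySem.List.pyRange_one_cons (by omega)]
      simp
    obtain ⟨M, hM⟩ : ∃ M, PySem.List.min? lst (fun y => y) = some M := by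
      cases h : PySem.List.min? lst (fun y => y) with
      | some M => exact ⟨M, rfl⟩
      | none => exact absurd ((PySem.List.min?_eq_none_iff _ _).mp h) hlstne
    -- each window max: membership and upper bound
    have hwinspec : ∀ i : Int, 0 ≤ i → i + w ≤ nI →
        f i ∈ (stones.drop i.toNat).take wn ∧ ∀ y ∈ (stones.drop i.toNat).take wn, y ≤ f i := by
      intro i hi0 hiw
      obtain ⟨mx, hmx⟩ := window_max_spec stones w i hw1 hi0 hiw
      have hfi : f i = mx := by simp only [hf, hmx, Option.getD_some]
      rw [window_eq stones w i hw1 hi0] at hmx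
      rw [hfi]
      exact ⟨PySem.List.max?_mem hmx, fun y hy => PySem.List.max?_isMax hmx y hy⟩
    -- characterization: mid ≤ M ↔ no all-below window
    have hchar : ∀ mid : Int, mid ≤ M ↔ ¬ Bad stones wn mid := by
      intro mid
      constructor
      · rintro hle ⟨i, hiw, hall⟩
        -- window i is all < mid, but its max is ≥ mid
        have hi0 : (0:Int) ≤ (i : Nat) := Int.natCast_nonneg i
        have hiw' : (i : Int) + w ≤ nI := by omega
        have hfin : f i ∈ lst := by
          rw [hlst]
          exact List.mem_map_of_mem (by rw [PySem.List.mem_pyRange_one]; omega)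
        have hMle : M ≤ f i := PySem.List.min?_isMin hM _ hfin
        obtain ⟨hmem, -⟩ := hwinspec i hi0 hiw'
        rw [Int.toNat_natCast] at hmem
        exact absurd (hall _ hmem) (by omega)
      · intro hnb
        -- M is some window's max; that window has an element ≥ mid… need all windows
        by_contra hlt
        rw [not_le] at hlt
        -- M < mid; M ∈ lst so M = f i for some i; window i has max M < mid, all elements < mid
        have hMmem := PySem.List.min?_mem hM
        rw [hlst] at hMmem
        obtain ⟨i, hi, hfi⟩ := List.mem_map.mp hMmem
        rw [PySem.List.mem_pyRange_one] at hi
        obtain ⟨hmem, hub⟩ := hwinspec i hi.1 (by omega)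
        apply hnb
        refine ⟨i.toNat, ?_, ?_⟩
        · have : ((i.toNat : Nat) : Int) = i := Int.toNat_of_nonneg hi.1
          omega
        · intro x hx
          have := hub x hx
          omega
    have hMR : M ≤ R := by
      have hMmem := PySem.List.min?_mem hM
      rw [hlst] at hMmem
      obtain ⟨i, hi, hfi⟩ := List.mem_map.mp hMmem
      rw [PySem.List.mem_pyRange_one] at hi
      obtain ⟨hmem, -⟩ := hwinspec i hi.1 (by omega)
      rw [hfi] at hmem
      exact hRub M (List.mem_of_mem_drop (List.mem_of_mem_take hmem))
    have hA : solution stones k = if 1 ≤ R ∧ 1 ≤ M then min M R else 0 := by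
      unfold solution
      rw [hmax]
      refine bsLoop_eq stones k M _ 1 R 0 rfl ?_
      intro mid h1 h2
      cases hb : canCross k mid stones 0 with
      | false =>
        have := (canCross_zero_iff k mid wn hwhyp stones).mp hb
        have : ¬ mid ≤ M := fun h => (hchar mid).mp h this
        simp [this]
      | true =>
        have hnb : ¬ Bad stones wn mid := fun h =>
          by rw [(canCross_zero_iff k mid wn hwhyp stones).mpr h] at hb; exact Bool.noConfusion hb
        have := (hchar mid).mpr hnb
        simp [this]
    have hB : solution_alt stones k = if M > 0 then M else 0 := by
      unfold solution_alt
      simp only [← hnI, ← hwdef, if_neg (by omega : ¬ w > nI), ← hf, ← hlst, hM, Option.getD_some]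
    rw [hA, hB]
    split_ifs <;> omega

-- ===== VERDICT (by name: the statement is the Claim_ definition above) =====
theorem solution_spec : Claim_equal_solution := by
  intro stones k _ hpre
  show solution stones k = solution_alt stones k
  exact solution_eq_alt stones k hpre
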